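-- pv_equiv track=rewrite | github.com/nytio/cripto_traker | web/app/services/analytics.py | merge_prophet_forecast
-- ===== SOURCE A (Python) =====
-- from typing import Any
--
-- def merge_prophet_forecast(
--     series: list[dict[str, Any]], forecast: list[dict[str, Any]]
-- ) -> list[dict[str, Any]]:
--     if not forecast:
--         return series
--
--     base_row = {}
--     if series:
--         base_row = {key: None for key in series[0].keys() if key != "date"}
--
--     series_map = {row["date"]: row for row in series}
--     for row in forecast:
--         date_key = row["date"]
--         existing = series_map.get(date_key)
--         if existing is not None:
--             existing.update(row)
--         else:
--             merged = {"date": date_key, **base_row}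
--             merged.update(row)
--             series_map[date_key] = merged
--
--     return [series_map[date_key] for date_key in sorted(series_map)]
-- ===== SOURCE B (Python) =====
-- def merge_prophet_forecast(series, forecast):
--     if not forecast:
--         return series
--
--     base_row = {}
--     if series:
--         base_row = {key: None for key in series[0].keys() if key != "date"}
--
--     s_map = {}
--     for row in series:
--         s_map[row["date"]] = row
--     f_map = {}
--     for row in forecast:
--         d = row["date"]
--         if d in f_map:
--             f_map[d].update(row)
--         else:
--             f_map[d] = dict(row)
--
--     s_dates = sorted(s_map)
--     f_dates = sorted(f_map)
--     out = []
--     i = j = 0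
--     while i < len(s_dates) or j < len(f_dates):
--         if i < len(s_dates) and j < len(f_dates) and s_dates[i] == f_dates[j]:
--             row = s_map[s_dates[i]]
--             row.update(f_map[f_dates[j]])
--             out.append(row)
--             i += 1
--             j += 1
--         elif j >= len(f_dates) or (i < len(s_dates) and s_dates[i] < f_dates[j]):
--             out.append(s_map[s_dates[i]])
--             i += 1
--         else:
--             d = f_dates[j]
--             merged = {"date": d, **base_row}
--             merged.update(f_map[d])
--             out.append(merged)
--             j += 1
--     return out
-- ===== Notes on version B (the rewrite author's own statement) =====
-- stated objective: alternative
-- what changed: Instead of folding forecast rows into one date-keyed dict and sorting its keys at the end as A does, B groups the forecast rows by date in a separate dict and then merges the two individually sorted date sequences with a two-pointer walk, emitting each finished output row during the walk.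
import Mathlib
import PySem

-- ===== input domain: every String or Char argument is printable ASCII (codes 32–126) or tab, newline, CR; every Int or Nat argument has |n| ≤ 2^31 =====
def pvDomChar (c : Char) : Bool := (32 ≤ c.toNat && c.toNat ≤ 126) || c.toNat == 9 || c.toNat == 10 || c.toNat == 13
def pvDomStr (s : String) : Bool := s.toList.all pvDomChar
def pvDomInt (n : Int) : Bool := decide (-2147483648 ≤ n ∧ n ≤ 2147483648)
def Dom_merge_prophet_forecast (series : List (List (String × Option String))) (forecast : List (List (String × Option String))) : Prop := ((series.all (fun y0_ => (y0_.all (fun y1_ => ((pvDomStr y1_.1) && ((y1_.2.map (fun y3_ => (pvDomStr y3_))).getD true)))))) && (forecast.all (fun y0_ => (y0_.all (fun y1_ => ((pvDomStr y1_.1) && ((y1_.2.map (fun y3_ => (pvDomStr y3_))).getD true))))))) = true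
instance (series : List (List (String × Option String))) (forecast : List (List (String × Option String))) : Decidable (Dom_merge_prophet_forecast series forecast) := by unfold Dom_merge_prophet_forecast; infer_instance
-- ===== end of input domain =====

-- B replaces A's sequential rewrite of one big dict by an explicit two-pointer merge of the two
-- sorted date sequences (objective: alternative decomposition).  Python A and B mutate matched
-- series rows in place; the equivalence proved here is about the RETURN value only.

-- rows are Python dicts: the assoc-list argument rows are read dict-wise (last value wins)
abbrev PvRow := PySem.Dict String (Option String)
abbrev PvMap := PySem.Dict (Option String) PvRow

-- ===== PORT A =====
-- row["date"] (default irrelevant: Pre_ guarantees the key is present)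
def pvRowDate (r : PvRow) : Option String := (r.get? "date").getD none

-- base_row = {key: None for key in series[0].keys() if key != "date"} (or {} if series empty)
def pvBaseRow (seriesD : List PvRow) : PvRow :=
  match seriesD with
  | [] => PySem.Dict.empty
  | r0 :: _ => PySem.Dict.ofList ((r0.keys.filter (fun k => k != "date")).map (fun k => (k, (none : Option String))))

-- merged = {"date": date_key, **base_row}
def pvFreshRow (base : PvRow) (d : Option String) : PvRow :=
  (PySem.Dict.empty.insert "date" d).update base.items

-- series_map = {row["date"]: row for row in series}
def pvSeriesMap (l : List PvRow) : PvMap :=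
  l.foldl (fun m r => m.insert (pvRowDate r) r) PySem.Dict.empty

-- A's forecast loop: existing.update(row) in place, else insert merged row
def pvForecastFoldA (base : PvRow) (l : List PvRow) (m : PvMap) : PvMap :=
  l.foldl (fun m r =>
    m.insert (pvRowDate r)
      (match m.get? (pvRowDate r) with
       | some existing => existing.update r.items
       | none => (pvFreshRow base (pvRowDate r)).update r.items)) m

def merge_prophet_forecast (series : List (List (String × Option String))) (forecast : List (List (String × Option String))) : List (List (String × Option String)) :=
  if forecast = [] then series else
    let seriesD := series.map PySem.Dict.ofList
    let forecastD := forecast.map PySem.Dict.ofList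
    let base_row := pvBaseRow seriesD
    let sm := pvForecastFoldA base_row forecastD (pvSeriesMap seriesD)
    (PySem.List.sorted sm.keys (fun k => k.getD "")).map (fun dk => (sm.getD dk PySem.Dict.empty).items)

-- ===== PORT B =====
-- f_map: forecast rows grouped by date, duplicates folded via update
def pvGroupF (l : List PvRow) : PvMap :=
  l.foldl (fun m r =>
    m.insert (pvRowDate r)
      (match m.get? (pvRowDate r) with
       | some ex => ex.update r.items
       | none => r)) PySem.Dict.empty

-- the two-pointer walk over the two sorted date sequences
def pvMergeWalk (base : PvRow) (s_map f_map : PvMap) :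
    List (Option String) → List (Option String) → List (List (String × Option String))
  | [], [] => []
  | [], df :: fs =>
      (((pvFreshRow base df).update ((f_map.getD df PySem.Dict.empty).items)).items)
        :: pvMergeWalk base s_map f_map [] fs
  | ds :: ss, [] =>
      ((s_map.getD ds PySem.Dict.empty).items) :: pvMergeWalk base s_map f_map ss []
  | ds :: ss, df :: fs =>
      if ds = df then
        (((s_map.getD ds PySem.Dict.empty).update ((f_map.getD df PySem.Dict.empty).items)).items)
          :: pvMergeWalk base s_map f_map ss fs
      else if (ds.getD "") < (df.getD "") then
        ((s_map.getD ds PySem.Dict.empty).items) :: pvMergeWalk base s_map f_map ss (df :: fs)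
      else
        (((pvFreshRow base df).update ((f_map.getD df PySem.Dict.empty).items)).items)
          :: pvMergeWalk base s_map f_map (ds :: ss) fs
  termination_by ss fs => ss.length + fs.length

def merge_prophet_forecast_alt (series : List (List (String × Option String))) (forecast : List (List (String × Option String))) : List (List (String × Option String)) :=
  if forecast = [] then series else
    let seriesD := series.map PySem.Dict.ofList
    let forecastD := forecast.map PySem.Dict.ofList
    let base_row := pvBaseRow seriesD
    let s_map := pvSeriesMap seriesD
    let f_map := pvGroupF forecastD
    pvMergeWalk base_row s_map f_map
      (PySem.List.sorted s_map.keys (fun k => k.getD ""))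
      (PySem.List.sorted f_map.keys (fun k => k.getD ""))

-- ===== PRECONDITION & SPEC =====
def pvHasSomeDate (r : List (String × Option String)) : Bool :=
  match (PySem.Dict.ofList r).get? "date" with | some (some _) => true | _ => false
def pvHasNoneDate (r : List (String × Option String)) : Bool :=
  match (PySem.Dict.ofList r).get? "date" with | some none => true | _ => false
-- Pre_ excludes exactly the inputs where Python A raises: with a nonempty forecast every row must
-- carry a "date" key (else KeyError), and the date values must be all strings or all None
-- (sorted() over mixed None/str keys raises TypeError).
def Pre_merge_prophet_forecast (series : List (List (String × Option String))) (forecast : List (List (String × Option String))) : Prop :=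
  forecast = [] ∨
    ((series ++ forecast).all pvHasSomeDate = true ∨ (series ++ forecast).all pvHasNoneDate = true)
instance (series : List (List (String × Option String))) (forecast : List (List (String × Option String))) : Decidable (Pre_merge_prophet_forecast series forecast) := by unfold Pre_merge_prophet_forecast; infer_instance

def pvWitness_merge_prophet_forecast : (List (List (String × Option String))) × (List (List (String × Option String))) :=
  ([[("date", some "2021-01-01"), ("y", some "1")]],
   [[("date", some "2021-01-02"), ("yhat", none)], [("date", some "2021-01-01"), ("yhat", some "2")]])

def Spec_merge_prophet_forecast (series : List (List (String × Option String))) (forecast : List (List (String × Option String))) (out : List (List (String × Option String))) : Prop := out = merge_prophet_forecast_alt series forecast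
instance (series : List (List (String × Option String))) (forecast : List (List (String × Option String))) (out : List (List (String × Option String))) : Decidable (Spec_merge_prophet_forecast series forecast out) := by unfold Spec_merge_prophet_forecast; infer_instance

-- ===== CLAIM (what is proved, stated in full; the proofs are below) =====
def Claim_equal_merge_prophet_forecast : Prop := ∀ (series : List (List (String × Option String))) (forecast : List (List (String × Option String))), Dom_merge_prophet_forecast series forecast → Pre_merge_prophet_forecast series forecast → Spec_merge_prophet_forecast series forecast (merge_prophet_forecast series forecast)

-- ===== LEMMAS AND PROOFS =====

theorem pv_insert_insert_comm_of_mem {κ ν : Type} [BEq κ] [LawfulBEq κ]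
    (y : PySem.Dict κ ν) {k k2 : κ} (v : ν) (v2 : ν)
    (hk : k ∈ y.keys) (hne : k2 ≠ k) :
    (y.insert k2 v2).insert k v = (y.insert k v).insert k2 v2 := by
  have hck : y.contains k = true := by
    rw [PySem.Dict.contains_iff_mem_keys]; exact hk
  have hkk2 : (k == k2) = false := by simp [(Ne.symm hne)]
  have hk2k : (k2 == k) = false := by simp [hne]
  apply PySem.Dict.ext
  by_cases hc2 : y.contains k2 = true
  · have h1 : (y.insert k2 v2).contains k = true := by
      rw [PySem.Dict.contains_insert, hck]; simp
    have h2 : (y.insert k v).contains k2 = true := by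
      rw [PySem.Dict.contains_insert, hc2]; simp
    rw [PySem.Dict.items_insert_of_contains _ _ h1,
        PySem.Dict.items_insert_of_contains _ _ hc2,
        PySem.Dict.items_insert_of_contains _ _ h2,
        PySem.Dict.items_insert_of_contains _ _ hck,
        List.map_map, List.map_map]
    apply List.map_congr_left
    intro p _
    simp only [Function.comp]
    by_cases hpk2 : p.1 = k2
    · simp [hpk2, hk2k]
    · by_cases hpk : p.1 = k
      · simp [hpk, hkk2]
      · simp [hpk, hpk2]
  · have hc2' : y.contains k2 = false := by simpa using hc2
    have h1 : (y.insert k2 v2).contains k = true := by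
      rw [PySem.Dict.contains_insert, hck]; simp
    have h2 : (y.insert k v).contains k2 = false := by
      rw [PySem.Dict.contains_insert, hc2', hk2k]; rfl
    rw [PySem.Dict.items_insert_of_contains _ _ h1,
        PySem.Dict.items_insert_of_not_contains _ _ hc2',
        PySem.Dict.items_insert_of_not_contains _ _ h2,
        PySem.Dict.items_insert_of_contains _ _ hck,
        List.map_append]
    simp [hk2k]

theorem pv_insert_update_of_not_mem {κ ν : Type} [BEq κ] [LawfulBEq κ]
    (t : List (κ × ν)) (y : PySem.Dict κ ν) {k : κ} (v : ν)
    (ht : k ∉ t.map Prod.fst) (hk : k ∈ y.keys) :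
    (y.update t).insert k v = (y.insert k v).update t := by
  induction t generalizing y with
  | nil => rfl
  | cons a t ih =>
    have hne : a.1 ≠ k := by
      intro h; exact ht (by simp [h])
    have ht' : k ∉ t.map Prod.fst := by
      intro h; exact ht (by simp [h])
    have hk' : k ∈ (y.insert a.1 a.2).keys := by
      rw [PySem.Dict.mem_keys_insert]; right; exact hk
    show ((y.insert a.1 a.2).update t).insert k v = ((y.insert k v).insert a.1 a.2).update t
    rw [ih (y.insert a.1 a.2) ht' hk',
        pv_insert_insert_comm_of_mem y v a.2 hk hne]

theorem pv_upd_map_replace {κ ν : Type} [BEq κ] [LawfulBEq κ]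
    (l : List (κ × ν)) (x : PySem.Dict κ ν) (k : κ) (v : ν)
    (hl : (l.map Prod.fst).Nodup) (hk : k ∈ l.map Prod.fst) :
    x.update (l.map (fun p => if p.1 == k then (k, v) else p)) = (x.update l).insert k v := by
  induction l generalizing x with
  | nil => simp at hk
  | cons a t ih =>
    rw [List.map_cons] at hl
    by_cases h : a.1 = k
    · have hkt : k ∉ t.map Prod.fst := by
        rw [← h]; exact (List.nodup_cons.mp hl).1
      have htid : t.map (fun p => if p.1 == k then (k, v) else p) = t := by
        conv_rhs => rw [show t = t.map id from (List.map_id t).symm]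
        apply List.map_congr_left
        intro p hp
        have : p.1 ≠ k := fun hpke => hkt (hpke ▸ List.mem_map_of_mem hp)
        simp [this, id]
      show x.update ((if a.1 == k then (k, v) else a) :: t.map _) = ((x.insert a.1 a.2).update t).insert k v
      rw [htid]
      simp only [h, beq_self_eq_true, if_pos]
      have hstep : x.update ((k, v) :: t) = (x.insert k v).update t := rfl
      rw [hstep,
          pv_insert_update_of_not_mem t (x.insert k a.2) v hkt
            (by rw [PySem.Dict.mem_keys_insert]; left; rfl),
          PySem.Dict.insert_insert_self]
    · have hk' : k ∈ t.map Prod.fst := by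
        rcases List.mem_cons.mp hk with h1 | h1
        · exact absurd h1.symm h
        · exact h1
      have hne : (a.1 == k) = false := by simp [h]
      show x.update ((if a.1 == k then (k, v) else a) :: t.map _) = ((x.insert a.1 a.2).update t).insert k v
      rw [hne]
      show (x.insert a.1 a.2).update (t.map _) = ((x.insert a.1 a.2).update t).insert k v
      exact ih (x.insert a.1 a.2) (List.nodup_cons.mp hl).2 hk'

theorem pv_update_insert {κ ν : Type} [BEq κ] [LawfulBEq κ]
    (x w : PySem.Dict κ ν) {k : κ} (v : ν) (hw : w.keys.Nodup) :
    x.update ((w.insert k v).items) = (x.update w.items).insert k v := by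
  by_cases hc : w.contains k = true
  · rw [PySem.Dict.items_insert_of_contains _ _ hc]
    have hk : k ∈ w.items.map Prod.fst := by
      rw [← PySem.Dict.keys, ← PySem.Dict.contains_iff_mem_keys]; exact hc
    exact pv_upd_map_replace w.items x k v hw hk
  · rw [PySem.Dict.items_insert_of_not_contains _ _ (by simpa using hc)]
    show x.update (w.items ++ [(k, v)]) = (x.update w.items).insert k v
    simp [PySem.Dict.update, List.foldl_append]

theorem pv_update_update {κ ν : Type} [BEq κ] [LawfulBEq κ]
    (l : List (κ × ν)) (x w : PySem.Dict κ ν) (hw : w.keys.Nodup) :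
    (x.update w.items).update l = x.update ((w.update l).items) := by
  induction l generalizing w with
  | nil => rfl
  | cons a t ih =>
    show ((x.update w.items).insert a.1 a.2).update t = x.update (((w.insert a.1 a.2).update t).items)
    rw [← pv_update_insert x w a.2 hw]
    exact ih (w.insert a.1 a.2) (PySem.Dict.nodup_keys_insert w a.1 a.2 hw)

def pvSeq (x : PvRow) (l : List PvRow) : PvRow := l.foldl (fun acc r => acc.update r.items) x

theorem pv_seq_assoc (l : List PvRow) (x w : PvRow) (hw : w.keys.Nodup)
    (hl : ∀ r ∈ l, r.keys.Nodup) :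
    x.update (pvSeq w l).items = pvSeq (x.update w.items) l := by
  induction l generalizing w with
  | nil => rfl
  | cons r t ih =>
    show x.update (pvSeq (w.update r.items) t).items = pvSeq ((x.update w.items).update r.items) t
    rw [pv_update_update r.items x w hw]
    exact ih (w.update r.items) (PySem.Dict.nodup_keys_update w r.items hw)
      (fun r' hr' => hl r' (List.mem_cons_of_mem _ hr'))

theorem pv_get_seriesMap (l : List PvRow) (m : PvMap) (d : Option String) :
    (l.foldl (fun m r => m.insert (pvRowDate r) r) m).get? d
      = l.foldl (fun cur r => if pvRowDate r = d then some r else cur) (m.get? d) := by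
  induction l generalizing m with
  | nil => rfl
  | cons r t ih =>
    simp only [List.foldl_cons]
    rw [ih]
    congr 1
    rw [PySem.Dict.get?_insert]
    by_cases h : pvRowDate r = d
    · simp [h]
    · simp [h, Ne.symm h]

theorem pv_get_foldA (base : PvRow) (l : List PvRow) (m : PvMap) (d : Option String) :
    (pvForecastFoldA base l m).get? d
      = l.foldl (fun cur r => if pvRowDate r = d then
          some ((cur.getD (pvFreshRow base d)).update r.items) else cur) (m.get? d) := by
  induction l generalizing m with
  | nil => rfl
  | cons r t ih =>
    show (pvForecastFoldA base t _).get? d = _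
    rw [ih]
    have hinit : (m.insert (pvRowDate r)
        (match m.get? (pvRowDate r) with
         | some existing => existing.update r.items
         | none => (pvFreshRow base (pvRowDate r)).update r.items)).get? d
        = if pvRowDate r = d then
            some (((m.get? d).getD (pvFreshRow base d)).update r.items) else m.get? d := by
      rw [PySem.Dict.get?_insert]
      by_cases h : pvRowDate r = d
      · subst h
        rw [if_pos rfl]
        cases m.get? (pvRowDate r) <;> simp
      · simp [h, Ne.symm h]
    rw [hinit, List.foldl_cons]

theorem pv_get_groupF_aux (l : List PvRow) (m : PySem.Dict (Option String) PvRow) (d : Option String) :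
    (l.foldl (fun m r =>
      m.insert (pvRowDate r)
        (match m.get? (pvRowDate r) with
         | some ex => ex.update r.items
         | none => r)) m).get? d
      = l.foldl (fun cur r => if pvRowDate r = d then
          some (match cur with | some ex => ex.update r.items | none => r) else cur) (m.get? d) := by
  induction l generalizing m with
  | nil => rfl
  | cons r t ih =>
    simp only [List.foldl_cons]
    rw [ih]
    have hinit : (m.insert (pvRowDate r)
        (match m.get? (pvRowDate r) with
         | some ex => ex.update r.items
         | none => r)).get? d
        = if pvRowDate r = d then
            some (match m.get? d with | some ex => ex.update r.items | none => r) else m.get? d := by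
      rw [PySem.Dict.get?_insert]
      by_cases h : pvRowDate r = d
      · subst h
        rw [if_pos rfl]
      · simp [h, Ne.symm h]
    rw [hinit]

theorem pv_get_groupF (l : List PvRow) (d : Option String) :
    (pvGroupF l).get? d
      = l.foldl (fun cur r => if pvRowDate r = d then
          some (match cur with | some ex => ex.update r.items | none => r) else cur) none := by
  exact pv_get_groupF_aux l PySem.Dict.empty d

theorem pv_seq_from_some (base : PvRow) (d : Option String) (fr : List PvRow) (x : PvRow) :
    fr.foldl (fun cur r => some (((cur.getD (pvFreshRow base d))).update r.items)) (some x)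
      = some (pvSeq x fr) := by
  induction fr generalizing x with
  | nil => rfl
  | cons r t ih => exact ih (x.update r.items)

theorem pv_seq_from_none (base : PvRow) (d : Option String) (fr : List PvRow) :
    fr.foldl (fun cur r => some (((cur.getD (pvFreshRow base d))).update r.items)) none
      = match fr with
        | [] => none
        | r0 :: rest => some (pvSeq ((pvFreshRow base d).update r0.items) rest) := by
  cases fr with
  | nil => rfl
  | cons r0 rest =>
    show rest.foldl _ (some ((pvFreshRow base d).update r0.items)) = _
    exact pv_seq_from_some base d rest _

theorem pv_groupF_from_some (fr : List PvRow) (x : PvRow) :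
    fr.foldl (fun cur r => some (match cur with | some ex => ex.update r.items | none => r)) (some x)
      = some (pvSeq x fr) := by
  induction fr generalizing x with
  | nil => rfl
  | cons r t ih => exact ih (x.update r.items)

theorem pv_groupF_from_none (fr : List PvRow) :
    fr.foldl (fun cur r => some (match cur with | some ex => ex.update r.items | none => r)) none
      = match fr with
        | [] => none
        | r0 :: rest => some (pvSeq r0 rest) := by
  cases fr with
  | nil => rfl
  | cons r0 rest => exact pv_groupF_from_some rest r0

def pvMergeD : List (Option String) → List (Option String) → List (Option String)
  | [], [] => []
  | [], df :: fs => df :: pvMergeD [] fs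
  | ds :: ss, [] => ds :: pvMergeD ss []
  | ds :: ss, df :: fs =>
      if ds = df then ds :: pvMergeD ss fs
      else if (ds.getD "") < (df.getD "") then ds :: pvMergeD ss (df :: fs)
      else df :: pvMergeD (ds :: ss) fs
  termination_by ss fs => ss.length + fs.length

theorem pv_mem_mergeD (ss fs : List (Option String)) (x : Option String) :
    x ∈ pvMergeD ss fs ↔ x ∈ ss ∨ x ∈ fs := by
  induction ss, fs using pvMergeD.induct with
  | case1 => simp [pvMergeD]
  | case2 df fs ih => simp [pvMergeD, ih]
  | case3 ds ss ih => simp [pvMergeD, ih]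
  | case4 ss df fs ih =>
    rw [pvMergeD, if_pos rfl]
    simp [ih]
    tauto
  | case5 ds ss df fs hne hlt ih =>
    rw [pvMergeD, if_neg hne, if_pos hlt]
    simp [ih]
    tauto
  | case6 ds ss df fs hne hlt ih =>
    rw [pvMergeD, if_neg hne, if_neg hlt]
    simp [ih]
    tauto

theorem pv_pairwise_mergeD (ss fs : List (Option String))
    (hs : ss.Pairwise (fun a b => a.getD "" < b.getD ""))
    (hf : fs.Pairwise (fun a b => a.getD "" < b.getD ""))
    (hx : ∀ a ∈ ss, ∀ b ∈ fs, a.getD "" = b.getD "" → a = b) :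
    (pvMergeD ss fs).Pairwise (fun a b => a.getD "" < b.getD "") := by
  induction ss, fs using pvMergeD.induct with
  | case1 => simp [pvMergeD]
  | case2 df fs ih =>
    rw [pvMergeD]
    refine List.pairwise_cons.mpr ⟨?_, ih List.Pairwise.nil (List.pairwise_cons.mp hf).2 (by simp)⟩
    intro b hb
    rcases (pv_mem_mergeD _ _ _).mp hb with h | h
    · simp at h
    · exact (List.pairwise_cons.mp hf).1 b h
  | case3 ds ss ih =>
    rw [pvMergeD]
    refine List.pairwise_cons.mpr ⟨?_, ih (List.pairwise_cons.mp hs).2 List.Pairwise.nil (by simp)⟩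
    intro b hb
    rcases (pv_mem_mergeD _ _ _).mp hb with h | h
    · exact (List.pairwise_cons.mp hs).1 b h
    · simp at h
  | case4 ss df fs ih =>
    rw [pvMergeD, if_pos rfl]
    have hs' := List.pairwise_cons.mp hs
    have hf' := List.pairwise_cons.mp hf
    refine List.pairwise_cons.mpr ⟨?_, ih hs'.2 hf'.2
      (fun a ha b hb hab => hx a (List.mem_cons_of_mem _ ha) b (List.mem_cons_of_mem _ hb) hab)⟩
    intro b hb
    rcases (pv_mem_mergeD _ _ _).mp hb with h | h
    · exact hs'.1 b h
    · exact hf'.1 b h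
  | case5 ds ss df fs hne hlt ih =>
    rw [pvMergeD, if_neg hne, if_pos hlt]
    have hs' := List.pairwise_cons.mp hs
    refine List.pairwise_cons.mpr ⟨?_, ih hs'.2 hf
      (fun a ha b hb hab => hx a (List.mem_cons_of_mem _ ha) b hb hab)⟩
    intro b hb
    rcases (pv_mem_mergeD _ _ _).mp hb with h | h
    · exact hs'.1 b h
    · rcases List.mem_cons.mp h with h1 | h1
      · exact h1 ▸ hlt
      · exact lt_trans hlt ((List.pairwise_cons.mp hf).1 b h1)
  | case6 ds ss df fs hne hlt ih =>
    rw [pvMergeD, if_neg hne, if_neg hlt]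
    have hf' := List.pairwise_cons.mp hf
    have hdf : df.getD "" < ds.getD "" := by
      rcases lt_or_eq_of_le (le_of_not_gt hlt) with h | h
      · exact h
      · exact absurd (hx ds List.mem_cons_self df List.mem_cons_self h.symm) hne
    refine List.pairwise_cons.mpr ⟨?_, ih hs hf'.2
      (fun a ha b hb hab => hx a ha b (List.mem_cons_of_mem _ hb) hab)⟩
    intro b hb
    rcases (pv_mem_mergeD _ _ _).mp hb with h | h
    · rcases List.mem_cons.mp h with h1 | h1
      · exact h1 ▸ hdf
      · exact lt_trans hdf ((List.pairwise_cons.mp hs).1 b h1)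
    · exact hf'.1 b h

theorem pv_walk_eq (base : PvRow) (s_map f_map : PvMap) (g : Option String → PvRow) :
    ∀ (ss fs : List (Option String)),
    ss.Pairwise (fun a b => a.getD "" < b.getD "") →
    fs.Pairwise (fun a b => a.getD "" < b.getD "") →
    (∀ d ∈ ss, d ∉ fs → s_map.getD d PySem.Dict.empty = g d) →
    (∀ d ∈ fs, d ∉ ss → (pvFreshRow base d).update ((f_map.getD d PySem.Dict.empty).items) = g d) →
    (∀ d ∈ ss, d ∈ fs → (s_map.getD d PySem.Dict.empty).update ((f_map.getD d PySem.Dict.empty).items) = g d) →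
    pvMergeWalk base s_map f_map ss fs = (pvMergeD ss fs).map (fun d => (g d).items) := by
  intro ss fs
  induction ss, fs using pvMergeD.induct with
  | case1 => intro _ _ _ _ _; rw [pvMergeWalk, pvMergeD]; rfl
  | case2 df fs ih =>
    intro hs hf h1 h2 h3
    rw [pvMergeWalk, pvMergeD, List.map_cons]
    rw [h2 df List.mem_cons_self (by simp),
        ih List.Pairwise.nil (List.pairwise_cons.mp hf).2
          (by simp)
          (fun d hd _ => h2 d (List.mem_cons_of_mem _ hd) (by simp))
          (by simp)]
  | case3 ds ss ih =>
    intro hs hf h1 h2 h3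
    rw [pvMergeWalk, pvMergeD, List.map_cons]
    rw [h1 ds List.mem_cons_self (by simp),
        ih (List.pairwise_cons.mp hs).2 List.Pairwise.nil
          (fun d hd _ => h1 d (List.mem_cons_of_mem _ hd) (by simp))
          (by simp)
          (by simp)]
  | case4 ss df fs ih =>
    intro hs hf h1 h2 h3
    have hs' := List.pairwise_cons.mp hs
    have hf' := List.pairwise_cons.mp hf
    rw [pvMergeWalk, pvMergeD, if_pos rfl, if_pos rfl, List.map_cons]
    rw [h3 df List.mem_cons_self List.mem_cons_self,
        ih hs'.2 hf'.2
          (fun d hd hnd => h1 d (List.mem_cons_of_mem _ hd)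
            (by
              intro hmem
              rcases List.mem_cons.mp hmem with h | h
              · exact absurd (h ▸ (hs'.1 d hd)) (lt_irrefl _)
              · exact hnd h))
          (fun d hd hnd => h2 d (List.mem_cons_of_mem _ hd)
            (by
              intro hmem
              rcases List.mem_cons.mp hmem with h | h
              · exact absurd (h ▸ (hf'.1 d hd)) (lt_irrefl _)
              · exact hnd h))
          (fun d hd1 hd2 => h3 d (List.mem_cons_of_mem _ hd1) (List.mem_cons_of_mem _ hd2))]
  | case5 ds ss df fs hne hlt ih =>
    intro hs hf h1 h2 h3
    have hs' := List.pairwise_cons.mp hs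
    have hf' := List.pairwise_cons.mp hf
    have hdsnf : ds ∉ df :: fs := by
      intro hmem
      rcases List.mem_cons.mp hmem with h | h
      · exact hne h
      · exact absurd hlt (lt_asymm (hf'.1 ds h))
    rw [pvMergeWalk, pvMergeD, if_neg hne, if_pos hlt, if_neg hne, if_pos hlt, List.map_cons]
    rw [h1 ds List.mem_cons_self hdsnf,
        ih hs'.2 hf
          (fun d hd hnd => h1 d (List.mem_cons_of_mem _ hd) hnd)
          (fun d hd hnd => h2 d hd
            (by
              intro hmem
              rcases List.mem_cons.mp hmem with h | h
              · exact hdsnf (h ▸ hd)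
              · exact hnd h))
          (fun d hd1 hd2 => h3 d (List.mem_cons_of_mem _ hd1) hd2)]
  | case6 ds ss df fs hne hlt ih =>
    intro hs hf h1 h2 h3
    have hs' := List.pairwise_cons.mp hs
    have hf' := List.pairwise_cons.mp hf
    have hdfns : df ∉ ds :: ss := by
      intro hmem
      rcases List.mem_cons.mp hmem with h | h
      · exact hne h.symm
      · exact hlt (hs'.1 df h)
    rw [pvMergeWalk, pvMergeD, if_neg hne, if_neg hlt, if_neg hne, if_neg hlt, List.map_cons]
    rw [h2 df List.mem_cons_self hdfns,
        ih hs hf'.2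
          (fun d hd hnd => h1 d hd
            (by
              intro hmem
              rcases List.mem_cons.mp hmem with h | h
              · exact hdfns (h ▸ hd)
              · exact hnd h))
          (fun d hd hnd => h2 d (List.mem_cons_of_mem _ hd) hnd)
          (fun d hd1 hd2 => h3 d hd1 (List.mem_cons_of_mem _ hd2))]

theorem pv_keys_seriesMap (l : List PvRow) :
    (pvSeriesMap l).keys = PySem.Set.ofList (l.map pvRowDate) := by
  unfold pvSeriesMap
  rw [PySem.Dict.keys_foldl_insert_key l pvRowDate (fun _ r => r) PySem.Dict.empty]
  rfl

theorem pv_keys_foldA (base : PvRow) (l : List PvRow) (m : PvMap) :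
    (pvForecastFoldA base l m).keys = PySem.Set.update m.keys (l.map pvRowDate) := by
  unfold pvForecastFoldA
  rw [PySem.Dict.keys_foldl_insert_key l pvRowDate
      (fun m r => (match m.get? (pvRowDate r) with
       | some existing => existing.update r.items
       | none => (pvFreshRow base (pvRowDate r)).update r.items)) m]

theorem pv_keys_groupF (l : List PvRow) :
    (pvGroupF l).keys = PySem.Set.ofList (l.map pvRowDate) := by
  unfold pvGroupF
  rw [PySem.Dict.keys_foldl_insert_key (key := pvRowDate)]
  rfl

theorem pv_sm_get (base : PvRow) (F : List PvRow) (m0 : PvMap) (d : Option String) :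
    (pvForecastFoldA base F m0).get? d
      = (F.filter (fun r => decide (pvRowDate r = d))).foldl
          (fun cur r => some ((cur.getD (pvFreshRow base d)).update r.items)) (m0.get? d) := by
  rw [pv_get_foldA, PySem.List.foldl_ite_eq_foldl_filter]

theorem pv_fm_get (F : List PvRow) (d : Option String) :
    (pvGroupF F).get? d
      = match F.filter (fun r => decide (pvRowDate r = d)) with
        | [] => none
        | r0 :: rest => some (pvSeq r0 rest) := by
  rw [pv_get_groupF, PySem.List.foldl_ite_eq_foldl_filter, pv_groupF_from_none]

theorem pv_strict_of_nodup (l : List (Option String))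
    (hn : l.Nodup) (hp : l.Pairwise (fun a b => a.getD "" ≤ b.getD ""))
    (hinj : ∀ a ∈ l, ∀ b ∈ l, a.getD "" = b.getD "" → a = b) :
    l.Pairwise (fun a b => a.getD "" < b.getD "") := by
  have hcomb := hp.and hn
  refine hcomb.imp_of_mem ?_
  intro a b ha hb hab
  rcases lt_or_eq_of_le hab.1 with h | h
  · exact h
  · exact absurd (hinj a ha b hb h) hab.2

theorem pv_seriesFold_value_mem (d : Option String) (l : List PvRow) (i : Option PvRow) (x : PvRow)
    (h : l.foldl (fun cur r => if pvRowDate r = d then some r else cur) i = some x) :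
    i = some x ∨ x ∈ l := by
  induction l generalizing i with
  | nil => exact Or.inl h
  | cons r t ih =>
    rcases ih _ h with h1 | h1
    · have h1' : (if pvRowDate r = d then some r else i) = some x := h1
      by_cases hr : pvRowDate r = d
      · rw [if_pos hr] at h1'
        obtain rfl := Option.some_injective _ h1'
        right; exact List.mem_cons_self
      · rw [if_neg hr] at h1'
        exact Or.inl h1'
    · right; exact List.mem_cons_of_mem _ h1

theorem pv_seriesMap_value_mem (l : List PvRow) (d : Option String) (x : PvRow)
    (h : (pvSeriesMap l).get? d = some x) : x ∈ l := by
  unfold pvSeriesMap at h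
  rw [pv_get_seriesMap] at h
  rcases pv_seriesFold_value_mem d l _ x h with h1 | h1
  · exact absurd h1 (by rw [PySem.Dict.get?_empty]; simp)
  · exact h1

-- ===== VERDICT (by name: the statement is the Claim_ definition above) =====
theorem merge_prophet_forecast_spec : Claim_equal_merge_prophet_forecast := by
  intro series forecast _hdom hpre
  unfold Spec_merge_prophet_forecast
  by_cases hf : forecast = []
  · simp [merge_prophet_forecast, merge_prophet_forecast_alt, hf]
  · simp only [merge_prophet_forecast, merge_prophet_forecast_alt, if_neg hf]
    set S : List PvRow := series.map PySem.Dict.ofList with hSdef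
    set F : List PvRow := forecast.map PySem.Dict.ofList with hFdef
    set base : PvRow := pvBaseRow S with hbase
    set sm0 : PvMap := pvSeriesMap S with hsm0
    set fm : PvMap := pvGroupF F with hfm
    set sm : PvMap := pvForecastFoldA base F sm0 with hsm
    set sd : List (Option String) := PySem.List.sorted sm0.keys (fun k => k.getD "") with hsd
    set fd : List (Option String) := PySem.List.sorted fm.keys (fun k => k.getD "") with hfd
    -- row dicts have unique keys
    have hSnd : ∀ r ∈ S, PySem.Dict.keys r |>.Nodup := by
      intro r hr
      obtain ⟨r', _, rfl⟩ := List.mem_map.mp hr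
      exact PySem.Dict.nodup_keys_ofList r'
    have hFnd : ∀ r ∈ F, PySem.Dict.keys r |>.Nodup := by
      intro r hr
      obtain ⟨r', _, rfl⟩ := List.mem_map.mp hr
      exact PySem.Dict.nodup_keys_ofList r'
    -- key sets
    have hks0 : sm0.keys = PySem.Set.ofList (S.map pvRowDate) := pv_keys_seriesMap S
    have hkf : fm.keys = PySem.Set.ofList (F.map pvRowDate) := pv_keys_groupF F
    have hksm : sm.keys = PySem.Set.update sm0.keys (F.map pvRowDate) := pv_keys_foldA base F sm0
    have hnd0 : sm0.keys.Nodup := by rw [hks0]; exact PySem.Set.nodup_ofList _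
    have hndf : fm.keys.Nodup := by rw [hkf]; exact PySem.Set.nodup_ofList _
    have hndm : sm.keys.Nodup := by rw [hksm]; exact PySem.Set.nodup_update _ _ hnd0
    -- membership
    have hmemsd : ∀ x, x ∈ sd ↔ x ∈ S.map pvRowDate := by
      intro x; rw [hsd, PySem.List.mem_sorted, hks0, PySem.Set.mem_ofList]
    have hmemfd : ∀ x, x ∈ fd ↔ x ∈ F.map pvRowDate := by
      intro x; rw [hfd, PySem.List.mem_sorted, hkf, PySem.Set.mem_ofList]
    have hmemm : ∀ x, x ∈ sm.keys ↔ x ∈ S.map pvRowDate ∨ x ∈ F.map pvRowDate := by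
      intro x
      rw [hksm, PySem.Set.mem_update, hks0, PySem.Set.mem_ofList]
    -- the date keys are comparable: all 'some' or all 'none'
    have hK : ∀ a ∈ (S ++ F).map pvRowDate, ∀ b ∈ (S ++ F).map pvRowDate,
        a.getD "" = b.getD "" → a = b := by
      have hback : ∀ d ∈ (S ++ F).map pvRowDate,
          ∃ r' ∈ series ++ forecast, pvRowDate (PySem.Dict.ofList r') = d := by
        intro d hd
        obtain ⟨r, hr, rfl⟩ := List.mem_map.mp hd
        rw [hSdef, hFdef, ← List.map_append] at hr
        obtain ⟨r', hr', rfl⟩ := List.mem_map.mp hr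
        exact ⟨r', hr', rfl⟩
      rcases hpre.resolve_left hf with hall | hall
      · have hd : ∀ d ∈ (S ++ F).map pvRowDate, ∃ s, d = some s := by
          intro d hd
          obtain ⟨r', hr', rfl⟩ := hback d hd
          have h1 := List.all_eq_true.mp hall r' hr'
          unfold pvHasSomeDate at h1
          unfold pvRowDate
          cases hg : (PySem.Dict.ofList r').get? "date" with
          | none => rw [hg] at h1; simp at h1
          | some v =>
            cases v with
            | none => rw [hg] at h1; simp at h1
            | some s => exact ⟨s, rfl⟩
        intro a ha b hb hab
        obtain ⟨sa, rfl⟩ := hd a ha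
        obtain ⟨sb, rfl⟩ := hd b hb
        simp only [Option.getD_some] at hab
        rw [hab]
      · have hd : ∀ d ∈ (S ++ F).map pvRowDate, d = none := by
          intro d hd
          obtain ⟨r', hr', rfl⟩ := hback d hd
          have h1 := List.all_eq_true.mp hall r' hr'
          unfold pvHasNoneDate at h1
          unfold pvRowDate
          cases hg : (PySem.Dict.ofList r').get? "date" with
          | none => rw [hg] at h1; simp at h1
          | some v =>
            cases v with
            | none => rfl
            | some s => rw [hg] at h1; simp at h1
        intro a ha b hb _
        rw [hd a ha, hd b hb]
    have hsubS : ∀ x, x ∈ S.map pvRowDate → x ∈ (S ++ F).map pvRowDate := by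
      intro x hx; rw [List.map_append]; exact List.mem_append_left _ hx
    have hsubF : ∀ x, x ∈ F.map pvRowDate → x ∈ (S ++ F).map pvRowDate := by
      intro x hx; rw [List.map_append]; exact List.mem_append_right _ hx
    -- strict sortedness of the two date lists
    have hndsd : sd.Nodup := (PySem.List.sorted_perm sm0.keys _ _).symm.nodup hnd0
    have hndfd : fd.Nodup := (PySem.List.sorted_perm fm.keys _ _).symm.nodup hndf
    have hssd : sd.Pairwise (fun a b => a.getD "" < b.getD "") := by
      refine pv_strict_of_nodup sd hndsd (PySem.List.sorted_pairwise _ _) ?_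
      intro a ha b hb
      exact hK a (hsubS a ((hmemsd a).mp ha)) b (hsubS b ((hmemsd b).mp hb))
    have hsfd : fd.Pairwise (fun a b => a.getD "" < b.getD "") := by
      refine pv_strict_of_nodup fd hndfd (PySem.List.sorted_pairwise _ _) ?_
      intro a ha b hb
      exact hK a (hsubF a ((hmemfd a).mp ha)) b (hsubF b ((hmemfd b).mp hb))
    -- per-date agreement of the two computations
    have h1 : ∀ d ∈ sd, d ∉ fd → sm0.getD d PySem.Dict.empty = sm.getD d PySem.Dict.empty := by
      intro d _ hdf
      have hfr : F.filter (fun r => decide (pvRowDate r = d)) = [] := by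
        rw [List.filter_eq_nil_iff]
        intro r hr
        simp only [decide_eq_true_eq]
        intro he
        exact hdf ((hmemfd d).mpr (he ▸ List.mem_map_of_mem hr))
      rw [PySem.Dict.getD_eq_get?_getD, PySem.Dict.getD_eq_get?_getD, hsm, pv_sm_get, hfr]
      rfl
    have h2 : ∀ d ∈ fd, d ∉ sd →
        (pvFreshRow base d).update ((fm.getD d PySem.Dict.empty).items) = sm.getD d PySem.Dict.empty := by
      intro d hdf hds
      have h0 : sm0.get? d = none := by
        rw [PySem.Dict.get?_eq_none_iff_not_mem_keys sm0 d]
        intro hmem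
        exact hds ((hmemsd d).mpr ((by rw [hks0, PySem.Set.mem_ofList] at hmem; exact hmem)))
      obtain ⟨r, hrF, hrd⟩ : ∃ r ∈ F, pvRowDate r = d := by
        obtain ⟨r, hr, hrd⟩ := List.mem_map.mp ((hmemfd d).mp hdf)
        exact ⟨r, hr, hrd⟩
      have hrfr : r ∈ F.filter (fun r => decide (pvRowDate r = d)) :=
        List.mem_filter.mpr ⟨hrF, by simp [hrd]⟩
      cases hfr : F.filter (fun r => decide (pvRowDate r = d)) with
      | nil => rw [hfr] at hrfr; simp at hrfr
      | cons r0 rest =>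
        have hfrsub : ∀ r' ∈ F.filter (fun r => decide (pvRowDate r = d)), PySem.Dict.keys r' |>.Nodup :=
          fun r' hr' => hFnd r' (List.mem_of_mem_filter hr')
        rw [hfr] at hfrsub
        have hsmd : sm.get? d = some (pvSeq ((pvFreshRow base d).update r0.items) rest) := by
          rw [hsm, pv_sm_get, hfr, h0, pv_seq_from_none]
        have hfmd : fm.get? d = some (pvSeq r0 rest) := by
          rw [hfm, pv_fm_get, hfr]
        rw [PySem.Dict.getD_eq_get?_getD, PySem.Dict.getD_eq_get?_getD, hsmd, hfmd]
        show (pvFreshRow base d).update (pvSeq r0 rest).items = pvSeq ((pvFreshRow base d).update r0.items) rest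
        exact pv_seq_assoc rest (pvFreshRow base d) r0 (hfrsub r0 List.mem_cons_self)
          (fun r' hr' => hfrsub r' (List.mem_cons_of_mem _ hr'))
    have h3 : ∀ d ∈ sd, d ∈ fd →
        (sm0.getD d PySem.Dict.empty).update ((fm.getD d PySem.Dict.empty).items) = sm.getD d PySem.Dict.empty := by
      intro d hds hdf
      obtain ⟨sRow, h0⟩ : ∃ x, sm0.get? d = some x := by
        have hmem : d ∈ sm0.keys := by
          rw [hks0, PySem.Set.mem_ofList]; exact (hmemsd d).mp hds
        cases hg : sm0.get? d with
        | none => exact absurd hmem ((PySem.Dict.get?_eq_none_iff_not_mem_keys sm0 d).mp hg)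
        | some x => exact ⟨x, rfl⟩
      have hsRow : sRow ∈ S := pv_seriesMap_value_mem S d sRow h0
      obtain ⟨r, hrF, hrd⟩ : ∃ r ∈ F, pvRowDate r = d := by
        obtain ⟨r, hr, hrd⟩ := List.mem_map.mp ((hmemfd d).mp hdf)
        exact ⟨r, hr, hrd⟩
      have hrfr : r ∈ F.filter (fun r => decide (pvRowDate r = d)) :=
        List.mem_filter.mpr ⟨hrF, by simp [hrd]⟩
      cases hfr : F.filter (fun r => decide (pvRowDate r = d)) with
      | nil => rw [hfr] at hrfr; simp at hrfr
      | cons r0 rest =>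
        have hfrsub : ∀ r' ∈ F.filter (fun r => decide (pvRowDate r = d)), PySem.Dict.keys r' |>.Nodup :=
          fun r' hr' => hFnd r' (List.mem_of_mem_filter hr')
        rw [hfr] at hfrsub
        have hsmd : sm.get? d = some (pvSeq (sRow.update r0.items) rest) := by
          rw [hsm, pv_sm_get, hfr, h0, List.foldl_cons, pv_seq_from_some]
          rfl
        have hfmd : fm.get? d = some (pvSeq r0 rest) := by
          rw [hfm, pv_fm_get, hfr]
        rw [PySem.Dict.getD_eq_get?_getD, PySem.Dict.getD_eq_get?_getD,
            PySem.Dict.getD_eq_get?_getD, hsmd, hfmd, h0]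
        show sRow.update (pvSeq r0 rest).items = pvSeq (sRow.update r0.items) rest
        exact pv_seq_assoc rest sRow r0 (hfrsub r0 List.mem_cons_self)
          (fun r' hr' => hfrsub r' (List.mem_cons_of_mem _ hr'))
    -- the walk is the merged date list mapped through the final rows
    have hwalk : pvMergeWalk base sm0 fm sd fd
        = (pvMergeD sd fd).map (fun d => (sm.getD d PySem.Dict.empty).items) :=
      pv_walk_eq base sm0 fm (fun d => sm.getD d PySem.Dict.empty) sd fd hssd hsfd h1 h2 h3
    -- A's sorted key list IS the merged date list
    have hpairm : (pvMergeD sd fd).Pairwise (fun a b => a.getD "" < b.getD "") :=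
      pv_pairwise_mergeD sd fd hssd hsfd
        (fun a ha b hb => hK a (hsubS a ((hmemsd a).mp ha)) b (hsubF b ((hmemfd b).mp hb)))
    have hndmg : (pvMergeD sd fd).Nodup :=
      hpairm.imp (fun {a b} hab => fun he => absurd (he ▸ hab) (lt_irrefl _))
    have hperm : (pvMergeD sd fd).Perm sm.keys := by
      rw [List.perm_ext_iff_of_nodup hndmg hndm]
      intro x
      rw [pv_mem_mergeD, hmemm x, hmemsd x, hmemfd x]
    have hsorted : PySem.List.sorted sm.keys (fun k => k.getD "") = pvMergeD sd fd :=
      PySem.List.sorted_eq_of_perm_of_pairwise_lt sm.keys (pvMergeD sd fd) _ hperm hpairm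
    rw [hsorted, hwalk]
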